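-- pv_equiv track=rewrite | github.com/ZouWang-spider/Cluster-ASTE | Cluster_ASTE/BaseModel/Pair_Process.py | pair_aspects_and_opinions
-- ===== SOURCE A (Python) =====
-- def pair_aspects_and_opinions(aspect_indices, opinion_indices, segment_positions):
--     pairs = []
--     segments = []
--
--     for i, aspect_group in enumerate(aspect_indices):
--         for j, opinion_group in enumerate(opinion_indices):
--             # 查找是否存在重叠的段落
--             # 假设每个段落都在segment_positions的一个位置里
--             for segment in segment_positions:
--                 # 如果方面词和观点词的任意一个元素在该段落中都存在，则进行配对
--                 if any(index in segment for index in aspect_group) and any(index in segment for index in opinion_group):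
--                     pairs.append((aspect_group, opinion_group))  # 添加配对
--                     segments.append(segment)  # 添加对应的段落
--                     break  # 一旦找到匹配的段落，跳出循环
--
--     # 如果没有找到任何配对,直接将aspect-opinion配对，并返回整个句子的index
--     if not pairs:
--         # 将所有的段落合并为一个段落
--         merged_segment = [index for segment in segment_positions for index in segment]
--
--         # 将当前所有的方面词和观点词配对
--         for aspect_group in aspect_indices:
--             for opinion_group in opinion_indices:
--                 pairs.append((aspect_group, opinion_group))  # 添加配对
--         segments.append(merged_segment)  # 将整个句子视为一个段落
--
--
--     return pairs, segments
-- ===== SOURCE B (Python) =====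
-- def pair_aspects_and_opinions(aspect_indices, opinion_indices, segment_positions):
--     # Convert each segment to a set once; precompute per group the (ascending) list of
--     # segment indices it touches; per pair take the earliest common segment index.
--     seg_sets = [set(seg) for seg in segment_positions]
--
--     def seg_idxs(group):
--         return [k for k, s in enumerate(seg_sets) if any(x in s for x in group)]
--
--     a_idxs = [seg_idxs(g) for g in aspect_indices]
--     o_idxs = [set(seg_idxs(g)) for g in opinion_indices]
--
--     pairs = []
--     segments = []
--     for a_group, aks in zip(aspect_indices, a_idxs):
--         for o_group, oks in zip(opinion_indices, o_idxs):
--             k = next((k for k in aks if k in oks), None)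
--             if k is not None:
--                 pairs.append((a_group, o_group))
--                 segments.append(segment_positions[k])
--
--     if not pairs:
--         merged = [x for seg in segment_positions for x in seg]
--         pairs = [(a, o) for a in aspect_indices for o in opinion_indices]
--         segments = [merged]
--
--     return pairs, segments
-- ===== Notes on version B (the rewrite author's own statement) =====
-- stated objective: faster
-- what changed: Instead of rescanning all segments per (aspect,opinion) pair, B precomputes once per group the list/set of segment indices the group touches, then per pair takes the first of the aspect's indices present in the opinion's index set.
import Mathlib
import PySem

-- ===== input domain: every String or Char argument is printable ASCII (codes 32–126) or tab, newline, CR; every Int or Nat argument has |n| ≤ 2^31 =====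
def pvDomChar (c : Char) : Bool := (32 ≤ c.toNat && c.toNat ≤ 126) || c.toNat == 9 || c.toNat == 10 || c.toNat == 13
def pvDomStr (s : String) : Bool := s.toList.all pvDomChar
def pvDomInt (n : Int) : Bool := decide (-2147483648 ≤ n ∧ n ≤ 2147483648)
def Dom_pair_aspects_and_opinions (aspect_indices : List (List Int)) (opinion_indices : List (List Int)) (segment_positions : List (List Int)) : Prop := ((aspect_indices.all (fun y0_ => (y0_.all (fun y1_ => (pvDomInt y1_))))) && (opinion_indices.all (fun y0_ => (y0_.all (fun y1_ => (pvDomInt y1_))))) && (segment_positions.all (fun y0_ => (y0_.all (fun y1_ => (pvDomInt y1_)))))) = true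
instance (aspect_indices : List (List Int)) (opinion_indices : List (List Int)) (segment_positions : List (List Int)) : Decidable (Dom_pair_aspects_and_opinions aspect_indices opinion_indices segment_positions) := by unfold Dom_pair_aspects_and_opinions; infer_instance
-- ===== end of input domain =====

-- B replaces A's per-pair rescan of all segments by per-group precomputed segment-index
-- lists, then takes the earliest common index per pair (objective: faster, asymptotically).

-- ===== PORT A =====
-- the inner 'for segment in segment_positions: … break' loop, threading (pairs, segments)
def pvAInner (ag og : List Int) (segs : List (List Int))
    (st : (List (List Int × List Int)) × List (List Int)) :
    (List (List Int × List Int)) × List (List Int) :=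
  match segs with
  | [] => st
  | s :: rest =>
    if (ag.any fun x => s.contains x) && (og.any fun x => s.contains x) then
      (st.1 ++ [(ag, og)], st.2 ++ [s])
    else pvAInner ag og rest st

def pair_aspects_and_opinions (aspect_indices : List (List Int)) (opinion_indices : List (List Int)) (segment_positions : List (List Int)) : (List (List Int × List Int)) × List (List Int) :=
  let st := aspect_indices.foldl
    (fun st ag => opinion_indices.foldl (fun st2 og => pvAInner ag og segment_positions st2) st)
    ([], [])
  if st.1 = [] then
    -- merged_segment comprehension
    let merged := segment_positions.flatMap (fun seg => seg)
    (aspect_indices.foldl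
      (fun ps ag => opinion_indices.foldl (fun ps2 og => ps2 ++ [(ag, og)]) ps) st.1,
     st.2 ++ [merged])
  else st

-- ===== PORT B =====
-- [k for k, s in enumerate(seg_sets) if any(x in s for x in group)]
-- (indices are list positions, hence Nat; zipIdx is Lean's enumerate)
def pvSegIdxs (segSets : List (PySem.Set Int)) (g : List Int) : List Nat :=
  ((segSets.zipIdx).filter (fun p => g.any fun x => p.1.contains x)).map (·.2)

def pair_aspects_and_opinions_alt (aspect_indices : List (List Int)) (opinion_indices : List (List Int)) (segment_positions : List (List Int)) : (List (List Int × List Int)) × List (List Int) :=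
  let segSets := segment_positions.map (fun seg => PySem.Set.ofList seg)
  let aIdxs := aspect_indices.map (pvSegIdxs segSets)
  let oIdxs := opinion_indices.map (pvSegIdxs segSets)
  let st := (aspect_indices.zip aIdxs).foldl
    (fun st p => (opinion_indices.zip oIdxs).foldl
      (fun st2 q =>
        match p.2.find? (fun k => q.2.contains k) with
        | some k => (st2.1 ++ [(p.1, q.1)], st2.2 ++ [segment_positions.getD k []])
        | none => st2) st)
    ([], [])
  if st.1 = [] then
    (aspect_indices.flatMap (fun a => opinion_indices.map (fun o => (a, o))),
     [segment_positions.flatMap (fun seg => seg)])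
  else st

-- ===== PRECONDITION & SPEC =====
def Spec_pair_aspects_and_opinions (aspect_indices : List (List Int)) (opinion_indices : List (List Int)) (segment_positions : List (List Int)) (out : (List (List Int × List Int)) × List (List Int)) : Prop := out = pair_aspects_and_opinions_alt aspect_indices opinion_indices segment_positions
instance (aspect_indices : List (List Int)) (opinion_indices : List (List Int)) (segment_positions : List (List Int)) (out : (List (List Int × List Int)) × List (List Int)) : Decidable (Spec_pair_aspects_and_opinions aspect_indices opinion_indices segment_positions out) := by unfold Spec_pair_aspects_and_opinions; infer_instance

-- ===== CLAIM (what is proved, stated in full; the proofs are below) =====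
def Claim_equal_pair_aspects_and_opinions : Prop := ∀ (aspect_indices : List (List Int)) (opinion_indices : List (List Int)) (segment_positions : List (List Int)), Dom_pair_aspects_and_opinions aspect_indices opinion_indices segment_positions → Spec_pair_aspects_and_opinions aspect_indices opinion_indices segment_positions (pair_aspects_and_opinions aspect_indices opinion_indices segment_positions)

-- ===== LEMMAS AND PROOFS =====

theorem pvFind?_congr {α : Type} (p q : α → Bool) (l : List α)
    (h : ∀ a ∈ l, p a = q a) : l.find? p = l.find? q := by
  induction l with
  | nil => rfl
  | cons a rest ih =>
    rw [List.find?_cons, List.find?_cons, h a (by simp)]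
    cases hq : q a
    · simp only [hq]
      exact ih (fun b hb => h b (by simp [hb]))
    · simp only [hq]

-- A's inner loop is find?-then-append
theorem pvAInner_eq_find (ag og : List Int) (segs : List (List Int)) (st : (List (List Int × List Int)) × List (List Int)) :
    pvAInner ag og segs st =
      match segs.find? (fun s => (ag.any fun x => s.contains x) && (og.any fun x => s.contains x)) with
      | some s => (st.1 ++ [(ag, og)], st.2 ++ [s])
      | none => st := by
  induction segs with
  | nil => rfl
  | cons s rest ih =>
    rw [pvAInner, List.find?_cons]
    cases h : ((ag.any fun x => s.contains x) && (og.any fun x => s.contains x))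
    · simp only [h, Bool.false_eq_true, if_false]
      exact ih
    · simp only [h, if_true]

-- every index produced by the enumerate-filter is ≥ the start offset
theorem pvSegIdxs_ge (sp : List (List Int)) (n : Nat) (P : List Int × Nat → Bool) (k : Nat)
    (hk : k ∈ ((sp.zipIdx n).filter P).map (·.2)) : n ≤ k := by
  simp only [List.mem_map, List.mem_filter] at hk
  obtain ⟨⟨s, m⟩, ⟨hmem, _⟩, hsnd⟩ := hk
  have := (List.mem_zipIdx hmem).1
  simp only at hsnd
  omega

-- B's per-pair search equals A's find? over the enumeration (generalized over the offset)
theorem pvFind_common (ag og : List Int) (sp : List (List Int)) (n : Nat) :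
    (((sp.zipIdx n).filter (fun p => ag.any fun x => p.1.contains x)).map (·.2)).find?
        (fun k => (((sp.zipIdx n).filter (fun p => og.any fun x => p.1.contains x)).map (·.2)).contains k)
      = ((sp.zipIdx n).find? (fun p => (ag.any fun x => p.1.contains x) && (og.any fun x => p.1.contains x))).map (·.2) := by
  induction sp generalizing n with
  | nil => simp [List.zipIdx_nil]
  | cons s rest ih =>
    rw [List.zipIdx_cons, List.filter_cons, List.filter_cons, List.find?_cons]
    cases ha : (ag.any fun x => s.contains x) <;> cases ho : (og.any fun x => s.contains x)
    · -- neither matches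
      simp only [ha, ho, Bool.false_eq_true, if_false, Bool.false_and]
      exact ih (n + 1)
    · -- opinion matches at n, aspect does not: o-list gains n, but all a-indices are > n
      simp only [ha, ho, Bool.false_eq_true, if_false, if_true, Bool.false_and, List.map_cons]
      rw [← ih (n + 1)]
      apply pvFind?_congr
      intro k hk
      have hgt := pvSegIdxs_ge rest (n + 1) _ k hk
      simp only [List.contains_cons]
      have hne : (k == n) = false := by simp; omega
      rw [hne, Bool.false_or]
    · -- aspect matches at n, opinion does not: n heads the a-list but is not in the o-list
      simp only [ha, ho, Bool.false_eq_true, if_false, if_true, Bool.and_false, List.map_cons, List.find?_cons]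
      have hcn : (((rest.zipIdx (n + 1)).filter (fun p => og.any fun x => p.1.contains x)).map (·.2)).contains n = false := by
        simp only [List.contains_eq_mem, decide_eq_false_iff_not]
        intro hmem
        have := pvSegIdxs_ge rest (n + 1) _ n hmem
        omega
      rw [hcn]
      simp only [Bool.false_eq_true, if_false]
      exact ih (n + 1)
    · -- both match at n
      simp only [ha, ho, if_true, Bool.and_self, List.map_cons, List.find?_cons, List.contains_cons,
        BEq.rfl, Bool.true_or, if_true, Option.map_some]
theorem pvZipIdx_find_getD (P : List Int → Bool) (sp : List (List Int)) (n : Nat) :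
    ((sp.zipIdx n).find? (fun p => P p.1)).map (fun p => (sp.getD (p.2 - n) [], p.1)) =
      (sp.find? P).map (fun s => (s, s)) := by
  induction sp generalizing n with
  | nil => simp [List.zipIdx_nil]
  | cons s rest ih =>
    rw [List.zipIdx_cons, List.find?_cons, List.find?_cons]
    cases h : P s
    · simp only [h, Bool.false_eq_true, if_false]
      rw [← ih (n + 1)]
      rcases hfind : (rest.zipIdx (n + 1)).find? (fun p => P p.1) with _ | q
      · rw [hfind]
        rfl
      · have hq : q ∈ rest.zipIdx (n + 1) := List.mem_of_find?_eq_some hfind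
        rcases q with ⟨a, m⟩
        have hge : n + 1 ≤ m := (List.mem_zipIdx hq).1
        rw [hfind]
        simp only [Option.map_some]
        have hm : m - n = (m - (n + 1)) + 1 := by omega
        rw [hm]
        rfl
    · simp only [h, if_true, Option.map_some, Nat.sub_self]
      rfl

-- set(seg) membership agrees with list membership
theorem pvContains_ofList (s : List Int) (x : Int) :
    (PySem.Set.ofList s).contains x = s.contains x := by
  simp [List.contains_eq_mem, PySem.Set.mem_ofList]

-- pvSegIdxs over the per-segment sets equals the raw enumerate-filter over the segments
theorem pvSegIdxs_map (sp : List (List Int)) (g : List Int) :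
    pvSegIdxs (sp.map (fun seg => PySem.Set.ofList seg)) g
      = ((sp.zipIdx).filter (fun p => g.any fun x => p.1.contains x)).map (·.2) := by
  unfold pvSegIdxs
  rw [List.zipIdx_map, List.filter_map, List.map_map]
  congr 1
  apply List.filter_congr
  intro p _
  simp only [Function.comp, Prod.map]
  congr 1
  funext x
  exact pvContains_ofList p.1 x

-- combined per-pair lemma: B's step equals A's inner loop
theorem pvStep_eq (ag og : List Int) (sp : List (List Int)) (st : (List (List Int × List Int)) × List (List Int)) :
    (match (pvSegIdxs (sp.map (fun seg => PySem.Set.ofList seg)) ag).find?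
        (fun k => (pvSegIdxs (sp.map (fun seg => PySem.Set.ofList seg)) og).contains k) with
      | some k => (st.1 ++ [(ag, og)], st.2 ++ [sp.getD k []])
      | none => st) = pvAInner ag og sp st := by
  rw [pvAInner_eq_find]
  have h2 := pvZipIdx_find_getD (fun s => (ag.any fun x => s.contains x) && (og.any fun x => s.contains x)) sp 0
  rw [pvSegIdxs_map, pvSegIdxs_map, pvFind_common]
  rcases hfind : (sp.zipIdx 0).find? (fun p => (ag.any fun x => p.1.contains x) && (og.any fun x => p.1.contains x)) with _ | q
  · rw [show (sp.zipIdx).find? (fun p => (ag.any fun x => p.1.contains x) && (og.any fun x => p.1.contains x)) = none from hfind] at h2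
    simp only [Option.map_none] at h2
    rcases hs : sp.find? (fun s => (ag.any fun x => s.contains x) && (og.any fun x => s.contains x)) with _ | s
    · rw [hfind, hs]
      rfl
    · rw [hs] at h2; simp at h2
  · rw [show (sp.zipIdx).find? (fun p => (ag.any fun x => p.1.contains x) && (og.any fun x => p.1.contains x)) = some q from hfind] at h2
    simp only [Option.map_some, Nat.sub_zero] at h2
    rcases hs : sp.find? (fun s => (ag.any fun x => s.contains x) && (og.any fun x => s.contains x)) with _ | s
    · rw [hs] at h2; simp at h2
    · rw [hs] at h2
      simp only [Option.map_some, Option.some.injEq, Prod.mk.injEq] at h2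
      rw [hfind]
      simp only [Option.map_some]
      rw [h2.1, hs]

-- folding over a list zipped with its own map
theorem pvFoldl_zip_map {α β γ : Type} (l : List α) (f : α → β) (F : γ → α × β → γ) (init : γ) :
    (l.zip (l.map f)).foldl F init = l.foldl (fun st a => F st (a, f a)) init := by
  induction l generalizing init with
  | nil => rfl
  | cons a rest ih => simp only [List.map_cons, List.zip_cons_cons, List.foldl_cons, ih]

-- the double loop appends to pairs and segments in lockstep
theorem pvAInner_len (ag og : List Int) (sp : List (List Int)) (st : (List (List Int × List Int)) × List (List Int))
    (h : st.1.length = st.2.length) :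
    (pvAInner ag og sp st).1.length = (pvAInner ag og sp st).2.length := by
  induction sp with
  | nil => exact h
  | cons s rest ih =>
    rw [pvAInner]
    split
    · simp [h]
    · exact ih

theorem pvLoop_len (ai oi sp : List (List Int)) (st : (List (List Int × List Int)) × List (List Int))
    (h : st.1.length = st.2.length) :
    ((ai.foldl (fun st ag => oi.foldl (fun st2 og => pvAInner ag og sp st2) st) st).1.length
      = (ai.foldl (fun st ag => oi.foldl (fun st2 og => pvAInner ag og sp st2) st) st).2.length) := by
  induction ai generalizing st with
  | nil => exact h
  | cons a rest ih =>
    rw [List.foldl_cons]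
    apply ih
    clear ih
    induction oi generalizing st with
    | nil => exact h
    | cons o orest ih2 =>
      rw [List.foldl_cons]
      exact ih2 _ (pvAInner_len _ _ _ _ h)

-- fallback all-pairs fold = flatMap
theorem pvFallback_inner (oi : List (List Int)) (ag : List Int) (ps : List (List Int × List Int)) :
    oi.foldl (fun ps2 og => ps2 ++ [(ag, og)]) ps = ps ++ oi.map (fun o => (ag, o)) := by
  induction oi generalizing ps with
  | nil => simp
  | cons o rest ih => simp [ih]

theorem pvFallback_outer (ai oi : List (List Int)) (ps : List (List Int × List Int)) :
    ai.foldl (fun ps ag => oi.foldl (fun ps2 og => ps2 ++ [(ag, og)]) ps) ps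
      = ps ++ ai.flatMap (fun a => oi.map (fun o => (a, o))) := by
  induction ai generalizing ps with
  | nil => simp
  | cons a rest ih =>
    rw [List.foldl_cons, pvFallback_inner, ih]
    simp [List.flatMap_cons, List.append_assoc]

-- ===== VERDICT (by name: the statement is the Claim_ definition above) =====
theorem pair_aspects_and_opinions_spec : Claim_equal_pair_aspects_and_opinions := by
  intro ai oi sp _
  unfold Spec_pair_aspects_and_opinions
  unfold pair_aspects_and_opinions pair_aspects_and_opinions_alt
  simp only [pvFoldl_zip_map, pvStep_eq]
  set st := ai.foldl (fun st ag => oi.foldl (fun st2 og => pvAInner ag og sp st2) st) ([], []) with hst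
  by_cases h1 : st.1 = []
  · have hlen : st.1.length = st.2.length := by
      rw [hst]; exact pvLoop_len ai oi sp ([], []) rfl
    have h2 : st.2 = [] := by
      rw [h1] at hlen
      exact List.eq_nil_of_length_eq_zero hlen.symm
    rw [if_pos h1, if_pos h1, pvFallback_outer, h1, h2]
    simp
  · rw [if_neg h1, if_neg h1]
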